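-- pv_equiv track=rewrite | github.com/vraj15x/PRODIGY_CS_03 | main.py | check_password_complexity
-- ===== SOURCE A (Python) =====
-- def check_password_complexity(password):
--     # Define criteria for password strength
--     length_criteria = len(password) >= 8
--     uppercase_criteria = any(char.isupper() for char in password)
--     lowercase_criteria = any(char.islower() for char in password)
--     digit_criteria = any(char.isdigit() for char in password)
--     special_char_criteria = any(not char.isalnum() for char in password)
--
--
--     if length_criteria and uppercase_criteria and lowercase_criteria and digit_criteria and special_char_criteria:
--         return "STRONG PASSWORD!"
--     else:
--         feedback = "WEAK PASSWORD!!!\nConsider the following improvements:\n"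
--         if not length_criteria:
--             feedback += "  --> Ensure that the password is at least 8 characters long\n"
--         if not uppercase_criteria:
--             feedback += "  --> Include at least one Uppercase letter\n"
--         if not lowercase_criteria:
--             feedback += "  --> Include at least one Lowercase letter\n"
--         if not digit_criteria:
--             feedback += "  --> Include at least one Digit\n"
--         if not special_char_criteria:
--             feedback += "  --> Include at least one Special character (!@#$%^&*(),.?\":{}|<>)\n"
--
--         return feedback
-- ===== SOURCE B (Python) =====
-- def check_password_complexity(password):
--     # One pass over the characters collecting flags; length checked separately.
--     has_upper = has_lower = has_digit = has_special = False
--     for ch in password: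
--         if ch.isupper():
--             has_upper = True
--         elif ch.islower():
--             has_lower = True
--         elif ch.isdigit():
--             has_digit = True
--         if not ch.isalnum():
--             has_special = True
--     checks = [
--         (len(password) >= 8, "  --> Ensure that the password is at least 8 characters long\n"),
--         (has_upper, "  --> Include at least one Uppercase letter\n"),
--         (has_lower, "  --> Include at least one Lowercase letter\n"),
--         (has_digit, "  --> Include at least one Digit\n"),
--         (has_special, "  --> Include at least one Special character (!@#$%^&*(),.?\":{}|<>)\n"),
--     ]
--     if all(ok for ok, _ in checks):
--         return "STRONG PASSWORD!"
--     return "WEAK PASSWORD!!!\nConsider the following improvements:\n" + "".join(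
--         msg for ok, msg in checks if not ok)
-- ===== Notes on version B (the rewrite author's own statement) =====
-- stated objective: simpler
-- what changed: B replaces A's five independent scans of the password and chain of inline feedback ifs with a single flag-collecting pass plus a data-driven (flag, message) table folded into the feedback.
import Mathlib
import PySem

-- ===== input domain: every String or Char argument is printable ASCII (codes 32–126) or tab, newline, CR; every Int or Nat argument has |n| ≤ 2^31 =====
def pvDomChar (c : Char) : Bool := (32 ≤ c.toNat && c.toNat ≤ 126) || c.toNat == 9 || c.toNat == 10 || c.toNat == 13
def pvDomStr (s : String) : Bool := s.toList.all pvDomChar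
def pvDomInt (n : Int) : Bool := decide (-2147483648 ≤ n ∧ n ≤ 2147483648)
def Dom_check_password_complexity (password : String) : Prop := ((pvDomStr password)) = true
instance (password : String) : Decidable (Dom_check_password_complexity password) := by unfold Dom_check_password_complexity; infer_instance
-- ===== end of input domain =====

-- B replaces A's five separate scans with one flag-collecting pass plus a (flag, message) table; objective: simpler.


-- ===== PORT A =====
def check_password_complexity (password : String) : String :=
  let cs := password.toList
  let length_criteria := decide (8 ≤ cs.length)
  let uppercase_criteria := cs.any PySem.Chars.isupper
  let lowercase_criteria := cs.any PySem.Chars.islower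
  let digit_criteria := cs.any PySem.Chars.isdigit
  let special_char_criteria := cs.any (fun c => !PySem.Chars.isalnum c)
  if length_criteria && uppercase_criteria && lowercase_criteria && digit_criteria && special_char_criteria then
    "STRONG PASSWORD!"
  else
    let feedback := "WEAK PASSWORD!!!\nConsider the following improvements:\n"
    let feedback := if !length_criteria then feedback ++ "  --> Ensure that the password is at least 8 characters long\n" else feedback
    let feedback := if !uppercase_criteria then feedback ++ "  --> Include at least one Uppercase letter\n" else feedback
    let feedback := if !lowercase_criteria then feedback ++ "  --> Include at least one Lowercase letter\n" else feedback
    let feedback := if !digit_criteria then feedback ++ "  --> Include at least one Digit\n" else feedback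
    let feedback := if !special_char_criteria then feedback ++ "  --> Include at least one Special character (!@#$%^&*(),.?\":{}|<>)\n" else feedback
    feedback

-- ===== PORT B =====
-- one pass: the loop body of Source B as a fold step over (has_upper, has_lower, has_digit, has_special)
def pvStepB (st : Bool × Bool × Bool × Bool) (ch : Char) : Bool × Bool × Bool × Bool :=
  let (u, l, d, s) := st
  let (u, l, d) :=
    if PySem.Chars.isupper ch then (true, l, d)
    else if PySem.Chars.islower ch then (u, true, d)
    else if PySem.Chars.isdigit ch then (u, l, true)
    else (u, l, d)
  let s := if !PySem.Chars.isalnum ch then true else s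
  (u, l, d, s)

def check_password_complexity_alt (password : String) : String :=
  let (has_upper, has_lower, has_digit, has_special) :=
    password.toList.foldl pvStepB (false, false, false, false)
  let checks : List (Bool × String) :=
    [ (decide (8 ≤ password.toList.length), "  --> Ensure that the password is at least 8 characters long\n"),
      (has_upper, "  --> Include at least one Uppercase letter\n"),
      (has_lower, "  --> Include at least one Lowercase letter\n"),
      (has_digit, "  --> Include at least one Digit\n"),
      (has_special, "  --> Include at least one Special character (!@#$%^&*(),.?\":{}|<>)\n") ]
  if checks.all (fun p => p.1) then
    "STRONG PASSWORD!"
  else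
    "WEAK PASSWORD!!!\nConsider the following improvements:\n" ++
      String.join ((checks.filter (fun p => !p.1)).map (fun p => p.2))

-- ===== PRECONDITION & SPEC =====
def Spec_check_password_complexity (password : String) (out : String) : Prop := out = check_password_complexity_alt password
instance (password : String) (out : String) : Decidable (Spec_check_password_complexity password out) := by unfold Spec_check_password_complexity; infer_instance

-- ===== CLAIM (what is proved, stated in full; the proofs are below) =====
def Claim_equal_check_password_complexity : Prop := ∀ (password : String), Dom_check_password_complexity password → Spec_check_password_complexity password (check_password_complexity password)

-- ===== LEMMAS AND PROOFS =====
lemma upper_not_lower {c : Char} (h : PySem.Chars.isupper c = true) : PySem.Chars.islower c = false := by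
  simp [PySem.Chars.islower, PySem.Chars.isupper, Char.le_def, UInt32.le_iff_toNat_le] at *
  omega

lemma upper_not_digit {c : Char} (h : PySem.Chars.isupper c = true) : PySem.Chars.isdigit c = false := by
  simp [PySem.Chars.isdigit, PySem.Chars.isupper, Char.le_def, UInt32.le_iff_toNat_le] at *
  omega

lemma lower_not_digit {c : Char} (h : PySem.Chars.islower c = true) : PySem.Chars.isdigit c = false := by
  simp [PySem.Chars.isdigit, PySem.Chars.islower, Char.le_def, UInt32.le_iff_toNat_le] at *
  omega

lemma foldl_pvStepB (cs : List Char) (u l d s : Bool) :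
    cs.foldl pvStepB (u, l, d, s) =
      (u || cs.any PySem.Chars.isupper, l || cs.any PySem.Chars.islower,
       d || cs.any PySem.Chars.isdigit, s || cs.any (fun c => !PySem.Chars.isalnum c)) := by
  induction cs generalizing u l d s with
  | nil => simp
  | cons c cs ih =>
    simp only [List.foldl_cons, List.any_cons, pvStepB]
    by_cases hu : PySem.Chars.isupper c
    · by_cases hs : PySem.Chars.isalnum c <;>
        simp [hu, hs, ih, upper_not_lower hu, upper_not_digit hu, Bool.or_left_comm]
    · by_cases hl : PySem.Chars.islower c
      · by_cases hs : PySem.Chars.isalnum c <;>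
          simp [hu, hl, hs, ih, lower_not_digit hl]
      · by_cases hd : PySem.Chars.isdigit c <;>
          by_cases hs : PySem.Chars.isalnum c <;>
            simp [hu, hl, hd, hs, ih]

-- ===== VERDICT (by name: the statement is the Claim_ definition above) =====
theorem check_password_complexity_spec : Claim_equal_check_password_complexity := by
  intro password _
  unfold Spec_check_password_complexity check_password_complexity check_password_complexity_alt
  rw [foldl_pvStepB]
  simp only []
  generalize decide (8 ≤ password.toList.length) = L
  generalize password.toList.any PySem.Chars.isupper = U
  generalize password.toList.any PySem.Chars.islower = Lo
  generalize password.toList.any PySem.Chars.isdigit = D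
  generalize password.toList.any (fun c => !PySem.Chars.isalnum c) = S
  cases L <;> cases U <;> cases Lo <;> cases D <;> cases S <;> rfl
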